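-- pv_equiv track=rewrite | github.com/leophin/Data-structure | anagram_stack.py | primeanagram
-- ===== SOURCE A (Python) =====
-- def primeanagram(n):
--     lst = []
--     anglist = []
--     for a in range(2, n):
--         for i in range(2, a):
--             if (a % i == 0):
--                 break
--         else:
--             lst.append(a)
--
--     for i in lst:
--         for j in range(lst.index(i) + 1, len(lst)):
--             new = str(i)
--             new1 = str(lst[j])
--             if sorted(new) == sorted(new1):
--                 anglist.append(new1)
--                 anglist.append(new)
--
--     return (anglist)
-- ===== SOURCE B (Python) =====
-- def _is_prime(a):
--     i = 2
--     while i * i <= a: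
--         if a % i == 0:
--             return False
--         i += 1
--     return True
--
--
-- def primeanagram(n):
--     primes = []
--     for a in range(2, n):
--         if _is_prime(a):
--             primes.append(a)
--
--     sigs = [tuple(sorted(str(p))) for p in primes]
--     buckets = {}
--     for k, s in enumerate(sigs):
--         buckets.setdefault(s, []).append(k)
--
--     out = []
--     for k, s in enumerate(sigs):
--         for j in buckets[s]:
--             if j > k:
--                 out.append(str(primes[j]))
--                 out.append(str(primes[k]))
--     return out
-- ===== Notes on version B (the rewrite author's own statement) =====
-- stated objective: faster
-- what changed: B replaces A's all-divisors primality scan (O(a) per number) with sqrt-bounded trial division and replaces A's quadratic pair scan with repeated lst.index calls and per-comparison re-sorting by computing each prime's sorted-digit signature once and bucketing prime indices by signature, so each prime is only compared against its own anagram bucket.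
import Mathlib
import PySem

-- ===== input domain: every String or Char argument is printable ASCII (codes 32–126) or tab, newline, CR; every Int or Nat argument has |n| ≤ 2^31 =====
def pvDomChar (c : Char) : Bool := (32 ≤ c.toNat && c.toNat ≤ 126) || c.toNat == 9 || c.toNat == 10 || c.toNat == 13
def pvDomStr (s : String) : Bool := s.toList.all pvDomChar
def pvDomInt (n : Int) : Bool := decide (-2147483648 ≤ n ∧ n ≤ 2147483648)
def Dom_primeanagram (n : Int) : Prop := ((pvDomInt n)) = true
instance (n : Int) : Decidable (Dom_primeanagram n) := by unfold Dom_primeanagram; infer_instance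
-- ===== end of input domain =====

-- B replaces A's O(n^2) all-divisor primality scan by a sqrt-bounded trial division and the
-- quadratic anagram pair scan (with its repeated lst.index passes) by one signature-bucket
-- index built once; objective: faster (asymptotic).

-- ===== PORT A =====
def primeanagram (n : Int) : List String :=
  let lst : List Int := (PySem.List.pyRange 2 n 1).foldl (fun lst a =>
    -- 'for i in range(2, a): if a % i == 0: break / else: lst.append(a)' — the loop body only
    -- breaks or falls through, so the for-else is exactly this all-divisors test
    if (PySem.List.pyRange 2 a 1).all (fun i => !(PySem.Int.mod a i == 0)) then lst ++ [a] else lst) []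
  lst.foldl (fun anglist i =>
    -- lst.index(i) never raises (i ∈ lst), so the .getD 0 default is never taken
    (PySem.List.pyRange ((((PySem.List.index? lst i).getD 0 : Nat) : Int) + 1) (PySem.List.len lst) 1).foldl
      (fun anglist j =>
        let new := PySem.Int.toStr i
        -- lst[j] with 0 ≤ j < len(lst): pyGetD's default is never taken
        let new1 := PySem.Int.toStr (PySem.List.pyGetD lst j 0)
        if PySem.List.sorted new.toList (fun c => c) false ==
           PySem.List.sorted new1.toList (fun c => c) false
        then anglist ++ [new1] ++ [new]
        else anglist) anglist) []

-- ===== PORT B =====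
-- 'while i * i <= a' encoded with fuel a.toNat (one unit per iteration); when fuel reaches 0
-- we have i = a + 2, where i * i <= a is false, so returning true is exactly what the loop does.
def primePagGo (a : Int) : Nat → Int → Bool
  | 0, _ => true
  | fuel + 1, i =>
    if i * i ≤ a then
      (if PySem.Int.mod a i == 0 then false else primePagGo a fuel (i + 1))
    else true

def isPrimePag (a : Int) : Bool := primePagGo a a.toNat 2

def primeanagram_alt (n : Int) : List String :=
  let primes : List Int := (PySem.List.pyRange 2 n 1).foldl
    (fun acc a => if isPrimePag a then acc ++ [a] else acc) []
  -- tuple(sorted(str(p))) is a tuple of the characters of str(p): ported as the sorted List Char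
  let sigs : List (List Char) := primes.map
    (fun p => PySem.List.sorted (PySem.Int.toStr p).toList (fun c => c) false)
  -- buckets.setdefault(s, []).append(k) is exactly Dict.modify s [] (· ++ [k])
  let buckets : PySem.Dict (List Char) (List Int) :=
    (PySem.List.enumerate sigs 0).foldl
      (fun d q => d.modify q.2 [] (fun l => l ++ [q.1])) PySem.Dict.empty
  (PySem.List.enumerate sigs 0).foldl (fun out q =>
    -- buckets[s] never raises (every signature was inserted), so the getD [] default is never taken
    (buckets.getD q.2 []).foldl (fun out j =>
      if j > q.1 then
        out ++ [PySem.Int.toStr (PySem.List.pyGetD primes j 0)]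
            ++ [PySem.Int.toStr (PySem.List.pyGetD primes q.1 0)]
      else out) out) []

-- ===== PRECONDITION & SPEC =====
def Spec_primeanagram (n : Int) (out : List String) : Prop := out = primeanagram_alt n
instance (n : Int) (out : List String) : Decidable (Spec_primeanagram n out) := by
  unfold Spec_primeanagram; infer_instance

-- ===== CLAIM (what is proved, stated in full; the proofs are below) =====
def Claim_equal_primeanagram : Prop := ∀ (n : Int), Dom_primeanagram n → Spec_primeanagram n (primeanagram n)

-- ===== LEMMAS AND PROOFS =====

-- the shared digit signature: sorted(str(p)) as a list of characters
def pagSig (p : Int) : List Char :=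
  PySem.List.sorted (PySem.Int.toStr p).toList (fun c => c) false

lemma primePagGo_iff (a : Int) : ∀ (fuel : Nat) (i : Int), 2 ≤ i → (a + 2 - i).toNat ≤ fuel →
    (primePagGo a fuel i = true ↔ ∀ m : Int, i ≤ m → m * m ≤ a → ¬ m ∣ a) := by
  intro fuel
  induction fuel with
  | zero =>
    intro i hi hf
    simp only [primePagGo, true_iff]
    intro m hm hma hd
    have hm2 : 2 ≤ m := le_trans hi hm
    have hai : a + 2 ≤ i := by omega
    have h2m : 2 * m ≤ m * m := by nlinarith
    omega
  | succ fuel ih =>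
    intro i hi hf
    simp only [primePagGo]
    split_ifs with h1 h2
    · rw [beq_iff_eq, PySem.Int.mod_eq_zero_iff_dvd] at h2
      apply iff_of_false (by simp)
      intro hall
      exact hall i le_rfl h1 h2
    · rw [beq_iff_eq, PySem.Int.mod_eq_zero_iff_dvd] at h2
      have hlt : i < a + 2 := by nlinarith
      rw [ih (i + 1) (by omega) (by omega)]
      constructor
      · intro h m hm hma
        rcases eq_or_lt_of_le hm with rfl | hlt'
        · exact h2
        · exact h m (by omega) hma
      · intro h m hm hma
        exact h m (by omega) hma
    · apply iff_of_true rfl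
      intro m hm hma hd
      have hm2 : 2 ≤ m := le_trans hi hm
      have : i * i ≤ m * m := by nlinarith
      omega

lemma isPrimePag_iff (a : Int) (ha : 2 ≤ a) :
    isPrimePag a = true ↔ ∀ m : Int, 2 ≤ m → m * m ≤ a → ¬ m ∣ a := by
  unfold isPrimePag
  exact primePagGo_iff a a.toNat 2 le_rfl (by omega)

lemma divisor_sqrt (a : Int) (ha : 2 ≤ a) :
    (∀ i : Int, 2 ≤ i → i < a → ¬ i ∣ a) ↔ (∀ m : Int, 2 ≤ m → m * m ≤ a → ¬ m ∣ a) := by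
  constructor
  · intro h m hm hma
    have : m < a := by nlinarith
    exact h m hm this
  · intro h i hi hia hd
    obtain ⟨j, hj⟩ := hd
    have hi0 : 0 < i := by omega
    have hj2 : 2 ≤ j := by
      rcases lt_trichotomy j 1 with h1 | h1 | h1
      · nlinarith
      · subst h1; rw [mul_one] at hj; omega
      · omega
    by_cases hii : i * i ≤ a
    · exact h i hi hii ⟨j, hj⟩
    · have hji : j < i := by nlinarith
      have hjj : j * j ≤ a := by nlinarith
      exact h j hj2 hjj ⟨i, by rw [hj, mul_comm]⟩

lemma pagPrimesEqAux (a : Int) (ha : 2 ≤ a) :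
    ((PySem.List.pyRange 2 a 1).all (fun i => !(PySem.Int.mod a i == 0)))
      = isPrimePag a := by
  rw [Bool.eq_iff_iff, List.all_eq_true, isPrimePag_iff a ha, ← divisor_sqrt a ha]
  constructor
  · intro h i hi hia hd
    have := h i (PySem.List.mem_pyRange_one.2 ⟨hi, hia⟩)
    rw [Bool.not_eq_eq_eq_not, Bool.not_true, beq_eq_false_iff_ne] at this
    exact this ((PySem.Int.mod_eq_zero_iff_dvd a i).2 hd)
  · intro h i hi
    obtain ⟨h2, hlt⟩ := PySem.List.mem_pyRange_one.1 hi
    simp only [Bool.not_eq_eq_eq_not, Bool.not_true, beq_eq_false_iff_ne]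
    intro hmod
    exact h i h2 hlt ((PySem.Int.mod_eq_zero_iff_dvd a i).1 hmod)

def pagPrimesA (n : Int) : List Int :=
  (PySem.List.pyRange 2 n 1).foldl (fun lst a =>
    if (PySem.List.pyRange 2 a 1).all (fun i => !(PySem.Int.mod a i == 0)) then lst ++ [a] else lst) []

def pagPrimesB (n : Int) : List Int :=
  (PySem.List.pyRange 2 n 1).foldl (fun acc a => if isPrimePag a then acc ++ [a] else acc) []

lemma pagPrimes_eq (n : Int) : pagPrimesA n = pagPrimesB n := by
  unfold pagPrimesA pagPrimesB
  rw [PySem.List.foldl_append_if_eq_filter, PySem.List.foldl_append_if_eq_filter]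
  congr 1
  apply List.filter_congr
  intro a ha
  exact pagPrimesEqAux a (PySem.List.mem_pyRange_one.1 ha).1

lemma pagPrimesB_pairwise (n : Int) : (pagPrimesB n).Pairwise (· < ·) := by
  unfold pagPrimesB
  rw [PySem.List.foldl_append_if_eq_filter, List.nil_append]
  exact (PySem.List.pairwise_lt_pyRange_one 2 n).sublist List.filter_sublist

lemma pagEnumerate_map {α β : Type} (f : α → β) (xs : List α) (s : Int) :
    PySem.List.enumerate (xs.map f) s = (PySem.List.enumerate xs s).map (fun q => (q.1, f q.2)) := by
  induction xs generalizing s with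
  | nil => simp [PySem.List.enumerate]
  | cons x xs ih => simp [PySem.List.enumerate_cons, ih]

lemma pagIndex?_getElem (L : List Int) (k : Nat) (hk : k < L.length) (hnd : L.Nodup) :
    PySem.List.index? L L[k] = some k := by
  rw [PySem.List.index?_eq_some_iff]
  refine ⟨L.take k, L.drop (k + 1), ?_, ?_, ?_⟩
  · conv_lhs => rw [← List.take_append_drop k L]
    rw [List.drop_eq_getElem_cons hk]
  · simp [List.length_take, Nat.min_eq_left hk.le]
  · intro hmem
    obtain ⟨j, hj, hje⟩ := List.mem_iff_getElem.1 hmem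
    have hjk : j < k := by simp [List.length_take] at hj; exact hj.1
    rw [List.getElem_take] at hje
    have := (List.Nodup.getElem_inj_iff hnd).1 hje
    omega

def pagBuckets (L : List Int) : PySem.Dict (List Char) (List Int) :=
  (PySem.List.enumerate (L.map pagSig) 0).foldl
    (fun d q => d.modify q.2 [] (fun l => l ++ [q.1])) PySem.Dict.empty

lemma pagBeqComm (x y : List Char) : (x == y) = (y == x) := by
  rw [Bool.eq_iff_iff, beq_iff_eq, beq_iff_eq]; exact eq_comm

lemma pagBucket (L : List Int) (s : List Char) :
    (pagBuckets L).getD s []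
    = (PySem.List.pyRange 0 (PySem.List.len (L.map pagSig)) 1).filter
        (fun j => pagSig (PySem.List.pyGetD L j 0) == s) := by
  unfold pagBuckets
  have h1 : (PySem.List.enumerate (L.map pagSig) 0).foldl
      (fun d q => d.modify q.2 [] (fun l => l ++ [q.1])) PySem.Dict.empty
      = (((PySem.List.enumerate (L.map pagSig) 0).map (fun q => (q.2, q.1))).foldl
          (fun d p => d.modify p.1 [] (fun l => l ++ [p.2])) PySem.Dict.empty) := by
    rw [List.foldl_map]
  rw [h1, PySem.Dict.getD_foldl_modify_append]
  rw [PySem.List.enumerate_eq_map_pyRange (L.map pagSig) (pagSig 0)]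
  simp only [List.map_map, List.filter_map, Function.comp_def, PySem.List.pyGetD_map]
  simp [List.map_id']

def pagPhase2A (L : List Int) : List String :=
  L.foldl (fun anglist i =>
    (PySem.List.pyRange ((((PySem.List.index? L i).getD 0 : Nat) : Int) + 1) (PySem.List.len L) 1).foldl
      (fun anglist j =>
        if PySem.List.sorted (PySem.Int.toStr i).toList (fun c => c) false ==
           PySem.List.sorted (PySem.Int.toStr (PySem.List.pyGetD L j 0)).toList (fun c => c) false
        then anglist ++ [PySem.Int.toStr (PySem.List.pyGetD L j 0)] ++ [PySem.Int.toStr i]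
        else anglist) anglist) []

def pagPhase2B (L : List Int) : List String :=
  (PySem.List.enumerate (L.map pagSig) 0).foldl (fun out q =>
    ((pagBuckets L).getD q.2 []).foldl (fun out j =>
      if j > q.1 then
        out ++ [PySem.Int.toStr (PySem.List.pyGetD L j 0)]
            ++ [PySem.Int.toStr (PySem.List.pyGetD L q.1 0)]
      else out) out) []

lemma pagPhase2_eq (L : List Int) (hL : L.Pairwise (· < ·)) : pagPhase2A L = pagPhase2B L := by
  have hnd : L.Nodup := hL.imp (fun h => ne_of_lt h)
  unfold pagPhase2A pagPhase2B
  have hA : ∀ (F : List String → Int → List String),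
      L.foldl F [] = (PySem.List.enumerate L 0).foldl (fun acc q => F acc q.2) [] := by
    intro F
    conv_lhs => rw [← PySem.List.map_snd_enumerate L 0]
    rw [List.foldl_map]
  rw [hA, pagEnumerate_map, List.foldl_map]
  apply PySem.List.foldl_congr_mem
  intro acc q hq
  obtain ⟨k, hk, rfl⟩ := (PySem.List.mem_enumerate_iff L 0 q).1 hq
  simp only [zero_add]
  rw [pagIndex?_getElem L k hk hnd]
  simp only [Option.getD_some]
  rw [PySem.List.foldl_if_eq_foldl_filter]
  simp only [List.append_assoc]
  rw [PySem.List.foldl_append_eq_flatMap]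
  rw [pagBucket]
  rw [PySem.List.foldl_ite_eq_foldl_filter (p := fun j => j > (k : Int))]
  rw [PySem.List.foldl_append_eq_flatMap]
  congr 1
  have hgk : PySem.List.pyGetD L (k : Int) 0 = L[k] := by
    rw [PySem.List.pyGetD_natCast]
    exact List.getD_eq_getElem L 0 hk
  rw [hgk]
  congr 1
  -- remaining: the two filtered index lists are equal
  have hlen : PySem.List.len (L.map pagSig) = (L.length : Int) := by
    simp [PySem.List.len_eq]
  have hlenL : PySem.List.len L = (L.length : Int) := by
    simp [PySem.List.len_eq]
  rw [hlen, hlenL, List.filter_filter]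
  rw [PySem.List.pyRange_one_append 0 ((k : Int) + 1) (L.length : Int) (by omega)
    (by exact_mod_cast Nat.succ_le_of_lt hk)]
  rw [List.filter_append]
  have h0 : (PySem.List.pyRange 0 ((k : Int) + 1) 1).filter
      (fun j => decide (j > (k : Int)) && (pagSig (PySem.List.pyGetD L j 0) == pagSig L[k])) = [] := by
    apply List.filter_eq_nil_iff.2
    intro j hj
    have := PySem.List.mem_pyRange_one.1 hj
    simp only [Bool.and_eq_true, decide_eq_true_eq]
    intro hcon
    omega
  have h2 : (PySem.List.pyRange ((k : Int) + 1) (L.length : Int) 1).filter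
      (fun j => decide (j > (k : Int)) && (pagSig (PySem.List.pyGetD L j 0) == pagSig L[k]))
      = (PySem.List.pyRange ((k : Int) + 1) (L.length : Int) 1).filter
        (fun j => pagSig L[k] == pagSig (PySem.List.pyGetD L j 0)) := by
    apply List.filter_congr
    intro j hj
    have hm := PySem.List.mem_pyRange_one.1 hj
    have : decide (j > (k : Int)) = true := by simp; omega
    rw [this, Bool.true_and, pagBeqComm]
  rw [h0, h2, List.nil_append]
  simp only [pagSig]

lemma primeanagram_eq (n : Int) : primeanagram n = pagPhase2A (pagPrimesA n) := rfl

lemma primeanagram_alt_eq (n : Int) : primeanagram_alt n = pagPhase2B (pagPrimesB n) := rfl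

-- ===== VERDICT (by name: the statement is the Claim_ definition above) =====
theorem primeanagram_spec : Claim_equal_primeanagram := by
  intro n _
  unfold Spec_primeanagram
  rw [primeanagram_eq, primeanagram_alt_eq, pagPrimes_eq,
    pagPhase2_eq _ (pagPrimesB_pairwise n)]
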